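-- pv_equiv track=rewrite | github.com/AndrewGluss/Python | max_len_group.py | max_len_group
-- ===== SOURCE A (Python) =====
-- def max_len_group(numb):
--     '''Функция приниает на вход число и возвращает максимальное количество чисел, чья сумма цифр каждого числа одинакова
--     '''
--     numbers = [i for i in range(1, numb + 1)]
--     sum_dict = dict()
--     for i in range(len(numbers)):
--         s = numbers[i]
--         for j in range(len(numbers)):
--             sumNum = 0
--             x = numbers[j]
--             while x > 0:
--                 sumNum += x%10
--                 x = x//10
--             if sumNum == s:
--                 sum_dict[s] = sum_dict.setdefault(s, []) + [numbers[j]]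
--     max_len = []
--     for value in sum_dict.values():
--         max_len.append(len(value))
--     return max(max_len)
-- ===== SOURCE B (Python) =====
-- def max_len_group(numb):
--     '''Max count of numbers in 1..numb sharing the same digit sum.'''
--     sums = []
--     for i in range(1, numb + 1):
--         s = 0
--         while i > 0:
--             s += i % 10
--             i //= 10
--         sums.append(s)
--     sums.sort()
--     best = 0
--     run = 0
--     prev = None
--     for s in sums:
--         if s == prev:
--             run += 1
--         else:
--             run = 1
--             prev = s
--         if run > best:
--             best = run
--     return best
-- ===== Notes on version B (the rewrite author's own statement) =====
-- stated objective: faster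
-- what changed: A rebuilds, for every i in 1..n, the whole group of numbers whose digit sum equals i by scanning all of 1..n again into a dict of lists; B computes each number's digit sum once into a list, sorts it, and takes the longest run of equal values in one scan — no dict and no nested rescans.
-- outside the precondition, e.g. on max_len_group(0): A raises ValueError, B returns 0
import Mathlib
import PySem

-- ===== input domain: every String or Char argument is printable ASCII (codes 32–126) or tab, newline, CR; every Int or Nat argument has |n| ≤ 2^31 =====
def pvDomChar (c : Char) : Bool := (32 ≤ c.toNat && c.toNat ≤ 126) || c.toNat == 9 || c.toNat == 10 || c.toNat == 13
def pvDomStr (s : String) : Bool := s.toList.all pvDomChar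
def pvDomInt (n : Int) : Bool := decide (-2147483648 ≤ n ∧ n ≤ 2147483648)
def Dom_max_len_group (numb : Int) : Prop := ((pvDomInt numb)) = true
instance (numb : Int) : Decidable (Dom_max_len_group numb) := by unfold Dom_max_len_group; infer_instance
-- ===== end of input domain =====

-- B replaces A's per-key rescan of the whole range (a dict of groups rebuilt by nested loops)
-- with one digit-sum list, sorted once, scanned once for the longest equal run.


-- ===== PORT A =====
-- the digit-sum while loop 'while x > 0: sumNum += x%10; x = x//10' (identical in A and in Source B)
def pvDigitLoop (sumNum x : Int) : Int :=
  if 0 < x then pvDigitLoop (sumNum + PySem.Int.mod x 10) (PySem.Int.floordiv x 10) else sumNum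
termination_by x.toNat
decreasing_by
  rw [PySem.Int.floordiv_eq_ediv_of_pos (by norm_num : (0:Int) < 10)]
  omega

def max_len_group (numb : Int) : Int :=
  let numbers := PySem.List.pyRange 1 (numb + 1)
  let d := List.foldl (fun d i =>
      let s := PySem.List.pyGetD numbers i 0
      List.foldl (fun d j =>
          let x := PySem.List.pyGetD numbers j 0
          let sumNum := pvDigitLoop 0 x
          if sumNum == s then
            let dd := d.setdefault s []
            dd.insert s (dd.getD s [] ++ [x])
          else d)
        d (PySem.List.pyRange 0 (PySem.List.len numbers)))
    (PySem.Dict.empty : PySem.Dict Int (List Int)) (PySem.List.pyRange 0 (PySem.List.len numbers))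
  let maxLen := List.foldl (fun acc v => acc ++ [(PySem.List.len v : Int)]) [] d.values
  (PySem.List.max? maxLen (fun y => y)).getD 0

-- ===== PORT B =====
def max_len_group_alt (numb : Int) : Int :=
  let sums := List.foldl (fun acc i => acc ++ [pvDigitLoop 0 i]) [] (PySem.List.pyRange 1 (numb + 1))
  let ss := PySem.List.sorted sums (fun x => x)
  let fin := List.foldl (fun (st : Int × Int × Option Int) s =>
      let rp := if some s == st.2.2 then (st.2.1 + 1, st.2.2) else (1, some s)
      let best := if rp.1 > st.1 then rp.1 else st.1
      (best, rp.1, rp.2)) ((0 : Int), (0 : Int), (none : Option Int)) ss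
  fin.1

-- ===== PRECONDITION & SPEC =====
-- A's final max([]) raises ValueError for numb ≤ 0; exactly those inputs are excluded.
def Pre_max_len_group (numb : Int) : Prop := 1 ≤ numb
instance (numb : Int) : Decidable (Pre_max_len_group numb) := by unfold Pre_max_len_group; infer_instance
def pvWitness_max_len_group : Int := 3

def Spec_max_len_group (numb : Int) (out : Int) : Prop := out = max_len_group_alt numb
instance (numb : Int) (out : Int) : Decidable (Spec_max_len_group numb out) := by unfold Spec_max_len_group; infer_instance

-- ===== CLAIM (what is proved, stated in full; the proofs are below) =====
def Claim_equal_max_len_group : Prop := ∀ (numb : Int), Dom_max_len_group numb → Pre_max_len_group numb → Spec_max_len_group numb (max_len_group numb)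

-- ===== LEMMAS AND PROOFS =====

def pvInnerStep (s : Int) (d : PySem.Dict Int (List Int)) (x : Int) : PySem.Dict Int (List Int) :=
  if pvDigitLoop 0 x == s then
    (d.setdefault s []).insert s ((d.setdefault s []).getD s [] ++ [x])
  else d

def pvOuter (numbers : List Int) (l : List Int) (d : PySem.Dict Int (List Int)) : PySem.Dict Int (List Int) :=
  List.foldl (fun d s => List.foldl (pvInnerStep s) d numbers) d l

-- the two pyGetD index loops are plain foldls over `numbers`
theorem maxA_shape (numb : Int) :
    max_len_group numb =
      (PySem.List.max? (((pvOuter (PySem.List.pyRange 1 (numb + 1)) (PySem.List.pyRange 1 (numb + 1)) PySem.Dict.empty).values).map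
        (fun v => (PySem.List.len v : Int))) (fun y => y)).getD 0 := by
  simp only [max_len_group, pvOuter]
  rw [PySem.List.foldl_append_singleton_eq_map]
  simp only [List.nil_append]
  rw [PySem.List.foldl_pyRange_zero_pyGetD (PySem.List.pyRange 1 (numb + 1)) 0
        (fun d s => List.foldl (fun d j =>
          if (pvDigitLoop 0 (PySem.List.pyGetD (PySem.List.pyRange 1 (numb + 1)) j 0) == s) = true then
            (d.setdefault s []).insert s
              ((d.setdefault s []).getD s [] ++ [PySem.List.pyGetD (PySem.List.pyRange 1 (numb + 1)) j 0])
          else d) d (PySem.List.pyRange 0 (PySem.List.len (PySem.List.pyRange 1 (numb + 1)))))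
        (PySem.Dict.empty : PySem.Dict Int (List Int))]
  have hfun : (fun (d : PySem.Dict Int (List Int)) (s : Int) => List.foldl (fun d j =>
          if (pvDigitLoop 0 (PySem.List.pyGetD (PySem.List.pyRange 1 (numb + 1)) j 0) == s) = true then
            (d.setdefault s []).insert s
              ((d.setdefault s []).getD s [] ++ [PySem.List.pyGetD (PySem.List.pyRange 1 (numb + 1)) j 0])
          else d) d (PySem.List.pyRange 0 (PySem.List.len (PySem.List.pyRange 1 (numb + 1)))))
      = fun d s => List.foldl (pvInnerStep s) d (PySem.List.pyRange 1 (numb + 1)) := by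
    funext d s
    exact PySem.List.foldl_pyRange_zero_pyGetD (PySem.List.pyRange 1 (numb + 1)) 0
      (fun d x => if (pvDigitLoop 0 x == s) = true then
        (d.setdefault s []).insert s ((d.setdefault s []).getD s [] ++ [x]) else d) d
  rw [hfun]

theorem pvInner_getD (s : Int) : ∀ (l : List Int) (d : PySem.Dict Int (List Int)) (c : Int),
    (List.foldl (pvInnerStep s) d l).getD c [] =
      if c = s then d.getD s [] ++ l.filter (fun x => pvDigitLoop 0 x == s) else d.getD c [] := by
  intro l
  induction l with
  | nil => intro d c; by_cases hc : c = s <;> simp [hc]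
  | cons x t ih =>
    intro d c
    rw [List.foldl_cons]
    by_cases hm : (pvDigitLoop 0 x == s) = true
    · rw [show pvInnerStep s d x =
          (d.setdefault s []).insert s ((d.setdefault s []).getD s [] ++ [x]) from by
            unfold pvInnerStep; rw [if_pos hm]]
      rw [ih]
      have hV : (d.setdefault s []).getD s [] = d.getD s [] := PySem.Dict.getD_setdefault_self d s [] []
      have hfil : (x :: t).filter (fun x => pvDigitLoop 0 x == s) =
          x :: t.filter (fun x => pvDigitLoop 0 x == s) := by simp [hm]
      by_cases hc : c = s
      · subst hc
        rw [if_pos rfl, if_pos rfl, PySem.Dict.getD_insert_self, hV, hfil]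
        simp
      · rw [if_neg hc, if_neg hc]
        rw [PySem.Dict.getD_insert, if_neg hc, PySem.Dict.getD_eq_get?_getD,
            PySem.Dict.get?_setdefault_of_ne d [] hc, ← PySem.Dict.getD_eq_get?_getD]
    · rw [show pvInnerStep s d x = d from by unfold pvInnerStep; rw [if_neg hm]]
      have hfil : (x :: t).filter (fun x => pvDigitLoop 0 x == s) =
          t.filter (fun x => pvDigitLoop 0 x == s) := by simp [hm]
      rw [ih, hfil]

theorem pvInner_keys (s : Int) : ∀ (l : List Int) (d : PySem.Dict Int (List Int)),
    (List.foldl (pvInnerStep s) d l).keys =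
      if l.filter (fun x => pvDigitLoop 0 x == s) = [] ∨ d.contains s = true
      then d.keys else d.keys ++ [s] := by
  intro l
  induction l with
  | nil => intro d; simp
  | cons x t ih =>
    intro d
    rw [List.foldl_cons]
    by_cases hm : (pvDigitLoop 0 x == s) = true
    · have hfil : (x :: t).filter (fun x => pvDigitLoop 0 x == s) =
          x :: t.filter (fun x => pvDigitLoop 0 x == s) := by simp [hm]
      rw [show pvInnerStep s d x =
          (d.setdefault s []).insert s ((d.setdefault s []).getD s [] ++ [x]) from by
            unfold pvInnerStep; rw [if_pos hm]]
      by_cases hc : d.contains s = true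
      · rw [PySem.Dict.setdefault_of_contains d [] hc]
        rw [ih]
        have h1 : (d.insert s (d.getD s [] ++ [x])).contains s = true := PySem.Dict.contains_insert_self _ _ _
        rw [if_pos (Or.inr h1), if_pos (Or.inr hc)]
        exact PySem.Dict.keys_insert_of_contains _ _ hc
      · have hc' : d.contains s = false := by simpa using hc
        rw [PySem.Dict.setdefault_of_not_contains d [] hc']
        rw [ih]
        rw [if_pos (Or.inr (PySem.Dict.contains_insert_self _ _ _)), if_neg (by rw [hfil]; simp [hc'])]
        rw [PySem.Dict.keys_insert_of_contains _ _ (PySem.Dict.contains_insert_self _ _ _)]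
        exact PySem.Dict.keys_insert_of_not_contains d [] hc'
    · rw [show pvInnerStep s d x = d from by unfold pvInnerStep; rw [if_neg hm]]
      have hfil : (x :: t).filter (fun x => pvDigitLoop 0 x == s) =
          t.filter (fun x => pvDigitLoop 0 x == s) := by simp [hm]
      rw [ih, hfil]

def pvGrpOf (N c : Int) : List Int := (PySem.List.pyRange 1 (N + 1)).filter (fun x => pvDigitLoop 0 x == c)

theorem pvOuter_inv (numb : Int) : ∀ (l : List Int) (d : PySem.Dict Int (List Int)),
    d.keys.Nodup → (∀ s ∈ l, d.contains s = false) → l.Nodup →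
    ( (∀ c ∈ l, (pvOuter (PySem.List.pyRange 1 (numb + 1)) l d).getD c [] = pvGrpOf numb c)
    ∧ (∀ c, c ∉ l → (pvOuter (PySem.List.pyRange 1 (numb + 1)) l d).getD c [] = d.getD c [])
    ∧ (∀ c, c ∈ (pvOuter (PySem.List.pyRange 1 (numb + 1)) l d).keys ↔
        c ∈ d.keys ∨ (c ∈ l ∧ pvGrpOf numb c ≠ []))
    ∧ (pvOuter (PySem.List.pyRange 1 (numb + 1)) l d).keys.Nodup ) := by
  intro l
  induction l with
  | nil =>
    intro d hnd _ _
    refine ⟨by simp, by intro c _; rfl, by simp [pvOuter], hnd⟩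
  | cons s t ih =>
    intro d hnd hcont hlnd
    have hcs : d.contains s = false := hcont s (by simp)
    have hsmem : s ∉ d.keys := by
      intro hmem
      rw [(PySem.Dict.contains_iff_mem_keys d s).mpr hmem] at hcs
      simp at hcs
    set N := PySem.List.pyRange 1 (numb + 1) with hN
    have hstep : pvOuter N (s :: t) d = pvOuter N t (List.foldl (pvInnerStep s) d N) := rfl
    set d1 := List.foldl (pvInnerStep s) d N with hd1
    have hk1 : d1.keys = if pvGrpOf numb s = [] ∨ d.contains s = true then d.keys else d.keys ++ [s] :=
      pvInner_keys s N d
    have hkmem1 : ∀ c, c ∈ d1.keys ↔ c ∈ d.keys ∨ (c = s ∧ pvGrpOf numb s ≠ []) := by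
      intro c
      rw [hk1]
      by_cases hg : pvGrpOf numb s = []
      · simp [hg]
      · simp [hg, hcs]
    have hnd1 : d1.keys.Nodup := by
      rw [hk1]
      by_cases hg : pvGrpOf numb s = []
      · simpa [hg] using hnd
      · simp [hg, hcs, List.nodup_append]
        exact ⟨hnd, fun a ha h => hsmem (h ▸ ha)⟩
    have hcont1 : ∀ c ∈ t, d1.contains c = false := by
      intro c hct
      have hcne : c ≠ s := fun h => (List.nodup_cons.mp hlnd).1 (h ▸ hct)
      have : c ∉ d1.keys := by
        rw [hkmem1]
        rintro (h | ⟨h, _⟩)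
        · have h2 := hcont c (List.mem_cons_of_mem _ hct)
          rw [(PySem.Dict.contains_iff_mem_keys d c).mpr h] at h2
          simp at h2
        · exact hcne h
      cases hcc : d1.contains c with
      | false => rfl
      | true => exact absurd ((PySem.Dict.contains_iff_mem_keys d1 c).mp hcc) this
    have hgs : d1.getD s [] = pvGrpOf numb s := by
      rw [hd1, pvInner_getD s N d, if_pos rfl, PySem.Dict.getD_of_not_contains d [] hcs]
      rfl
    have hgc : ∀ c, c ≠ s → d1.getD c [] = d.getD c [] := by
      intro c hcne
      rw [hd1, pvInner_getD s N d, if_neg hcne]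
    obtain ⟨H1, H2, H3, H4⟩ := ih d1 hnd1 hcont1 (List.nodup_cons.mp hlnd).2
    refine ⟨?_, ?_, ?_, ?_⟩
    · intro c hc
      rcases List.mem_cons.mp hc with hceq | hct
      · subst hceq
        rw [hstep, H2 c (List.nodup_cons.mp hlnd).1, hgs]
      · rw [hstep]; exact H1 c hct
    · intro c hc
      rw [hstep, H2 c (fun h => hc (List.mem_cons_of_mem _ h)),
          hgc c (fun h => hc (h ▸ (List.mem_cons_self : s ∈ s :: t)))]
    · intro c
      rw [hstep, H3 c, hkmem1 c]
      constructor
      · rintro ((h | ⟨rfl, hg⟩) | ⟨h1, h2⟩)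
        · exact Or.inl h
        · exact Or.inr ⟨List.mem_cons_self, hg⟩
        · exact Or.inr ⟨List.mem_cons_of_mem _ h1, h2⟩
      · rintro (h | ⟨h1, h2⟩)
        · exact Or.inl (Or.inl h)
        · rcases List.mem_cons.mp h1 with rfl | hct
          · exact Or.inl (Or.inr ⟨rfl, h2⟩)
          · exact Or.inr ⟨hct, h2⟩
    · rw [hstep]; exact H4

theorem pvDigitLoop_bounds : ∀ (n : Nat) (x acc : Int), x.toNat ≤ n → 0 < x →
    acc + 1 ≤ pvDigitLoop acc x ∧ pvDigitLoop acc x ≤ acc + x := by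
  intro n
  induction n with
  | zero => intro x acc hx hp; omega
  | succ n ih =>
    intro x acc hx hp
    rw [pvDigitLoop, if_pos hp,
        PySem.Int.mod_eq_emod_of_pos (by norm_num : (0:Int) < 10),
        PySem.Int.floordiv_eq_ediv_of_pos (by norm_num : (0:Int) < 10)]
    by_cases h10 : 0 < x / 10
    · have := ih (x / 10) (acc + x % 10) (by omega) h10
      omega
    · rw [pvDigitLoop, if_neg (by omega)]
      omega

theorem pvds_bounds {x : Int} (h : 1 ≤ x) : 1 ≤ pvDigitLoop 0 x ∧ pvDigitLoop 0 x ≤ x := by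
  have := pvDigitLoop_bounds x.toNat x 0 le_rfl (by omega)
  omega

def pvSums (numb : Int) : List Int := (PySem.List.pyRange 1 (numb + 1)).map (fun x => pvDigitLoop 0 x)

def pvIsMaxCount (l : List Int) (R : Int) : Prop :=
  (∃ v ∈ l, R = (l.count v : Int)) ∧ ∀ v ∈ l, (l.count v : Int) ≤ R

theorem pv_count_map (S : List Int) (f : Int → Int) (c : Int) :
    (S.map f).count c = S.countP (fun x => f x == c) := by
  induction S with
  | nil => simp
  | cons x t ih => simp [List.count_cons, List.countP_cons, ih]

theorem pv_grp_count (numb c : Int) : (pvGrpOf numb c).length = (pvSums numb).count c := by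
  rw [pvSums, pv_count_map, List.countP_eq_length_filter]
  rfl

theorem pv_mem_grp {numb x : Int} (hx : x ∈ PySem.List.pyRange 1 (numb + 1)) :
    x ∈ pvGrpOf numb (pvDigitLoop 0 x) := by
  rw [pvGrpOf, List.mem_filter]
  exact ⟨hx, by simp⟩

theorem pv_ds_mem_range {numb x : Int} (hx : x ∈ PySem.List.pyRange 1 (numb + 1)) :
    pvDigitLoop 0 x ∈ PySem.List.pyRange 1 (numb + 1) := by
  rw [PySem.List.mem_pyRange_one] at *
  have := pvds_bounds (x := x) (by omega)
  omega

theorem maxA_isMaxCount (numb : Int) (h : 1 ≤ numb) :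
    pvIsMaxCount (pvSums numb) (max_len_group numb) := by
  set N := PySem.List.pyRange 1 (numb + 1) with hN
  have hNnd : N.Nodup := PySem.List.nodup_pyRange_one 1 (numb + 1)
  obtain ⟨H1, _H2, H3, H4⟩ := pvOuter_inv numb N (PySem.Dict.empty) (by simp) (by simp) hNnd
  set D := pvOuter N N PySem.Dict.empty with hD
  have hkeys : ∀ c, c ∈ D.keys ↔ c ∈ N ∧ pvGrpOf numb c ≠ [] := by
    intro c; rw [H3 c]; simp
  have hvals : D.values = D.keys.map (fun k => D.getD k []) :=
    PySem.Dict.values_eq_map_keys D H4 []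
  have hshape := maxA_shape numb
  rw [hvals, List.map_map] at hshape
  have hmaxLen : ∀ m, m ∈ D.keys.map ((fun v => (PySem.List.len v : Int)) ∘ fun k => D.getD k []) ↔
      ∃ k ∈ D.keys, m = ((pvSums numb).count k : Int) := by
    intro m
    rw [List.mem_map]
    constructor
    · rintro ⟨k, hk, rfl⟩
      refine ⟨k, hk, ?_⟩
      have hkN := (hkeys k).mp hk
      rw [Function.comp_apply, H1 k hkN.1, PySem.List.len_eq, pv_grp_count]
    · rintro ⟨k, hk, rfl⟩
      refine ⟨k, hk, ?_⟩
      have hkN := (hkeys k).mp hk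
      rw [Function.comp_apply, H1 k hkN.1, PySem.List.len_eq, pv_grp_count]
  -- 1 is a key, so the length list is nonempty
  have h1N : (1 : Int) ∈ N := by rw [hN, PySem.List.mem_pyRange_one]; omega
  have h1key : (1 : Int) ∈ D.keys := by
    rw [hkeys]
    refine ⟨h1N, ?_⟩
    have := pv_mem_grp (numb := numb) h1N
    have hds1 : pvDigitLoop 0 1 = 1 := by have := pvds_bounds (x := 1) le_rfl; omega
    rw [hds1] at this
    exact List.ne_nil_of_mem this
  have hne : D.keys.map ((fun v => (PySem.List.len v : Int)) ∘ fun k => D.getD k []) ≠ [] := by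
    exact List.ne_nil_of_mem (List.mem_map_of_mem h1key)
  obtain ⟨M, hM⟩ : ∃ M, PySem.List.max? (D.keys.map ((fun v => (PySem.List.len v : Int)) ∘ fun k => D.getD k [])) (fun y => y) = some M := by
    cases hx : PySem.List.max? (D.keys.map ((fun v => (PySem.List.len v : Int)) ∘ fun k => D.getD k [])) (fun y => y) with
    | none => exact absurd ((PySem.List.max?_eq_none_iff _ _).mp hx) hne
    | some m => exact ⟨m, rfl⟩
  rw [hM, Option.getD_some] at hshape
  constructor
  · -- M is the count of some value occurring in sums
    have hmem := PySem.List.max?_mem hM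
    obtain ⟨k, hk, hMk⟩ := (hmaxLen M).mp hmem
    have hkN := (hkeys k).mp hk
    obtain ⟨x, hxg⟩ := List.exists_mem_of_ne_nil _ hkN.2
    rw [pvGrpOf, List.mem_filter] at hxg
    have hdsx : pvDigitLoop 0 x = k := by simpa using hxg.2
    refine ⟨k, ?_, by rw [hshape, hMk]⟩
    rw [pvSums, List.mem_map]
    exact ⟨x, hxg.1, hdsx⟩
  · intro v hv
    rw [pvSums, List.mem_map] at hv
    obtain ⟨x, hxN, hdsx⟩ := hv
    have hxpos : 1 ≤ x := by rw [PySem.List.mem_pyRange_one] at hxN; omega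
    have hvN : v ∈ N := hdsx ▸ pv_ds_mem_range hxN
    have hvkey : v ∈ D.keys := by
      rw [hkeys]
      exact ⟨hvN, List.ne_nil_of_mem (hdsx ▸ pv_mem_grp hxN)⟩
    have : ((pvSums numb).count v : Int) ∈ D.keys.map ((fun v => (PySem.List.len v : Int)) ∘ fun k => D.getD k []) :=
      (hmaxLen _).mpr ⟨v, hvkey, rfl⟩
    have := PySem.List.max?_isMax hM _ this
    rw [hshape]
    exact this


theorem pvIsMaxCount_unique {l : List Int} {R1 R2 : Int}
    (h1 : pvIsMaxCount l R1) (h2 : pvIsMaxCount l R2) : R1 = R2 := by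
  obtain ⟨⟨v1, hv1, e1⟩, u1⟩ := h1
  obtain ⟨⟨v2, hv2, e2⟩, u2⟩ := h2
  have := u2 v1 hv1
  have := u1 v2 hv2
  omega

def pvF (p r : Int) : List Int → Int
  | [] => r
  | x :: t => if x = p then pvF p (r + 1) t else max r (pvF x 1 t)

theorem pvF_ge (l : List Int) : ∀ p r, r ≤ pvF p r l := by
  induction l with
  | nil => intro p r; simp [pvF]
  | cons x t ih =>
    intro p r
    by_cases hx : x = p
    · simp only [pvF, hx]
      exact le_trans (by omega) (ih p (r + 1))
    · simp only [pvF, if_neg hx]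
      exact le_max_left _ _

def pvStep (st : Int × Int × Option Int) (s : Int) : Int × Int × Option Int :=
  let rp := if some s == st.2.2 then (st.2.1 + 1, st.2.2) else (1, some s)
  let best := if rp.1 > st.1 then rp.1 else st.1
  (best, rp.1, rp.2)

theorem pvFold_eq (l : List Int) : ∀ (b r p : Int), r ≤ b →
    (List.foldl pvStep (b, r, some p) l).1 = max b (pvF p r l) := by
  induction l with
  | nil => intro b r p h; simp [pvF]; omega
  | cons s t ih =>
    intro b r p h
    rw [List.foldl_cons]
    by_cases hsp : s = p
    · have hcond : (some s == some p) = true := by simp [hsp]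
      have hstep : pvStep (b, r, some p) s = (max b (r + 1), r + 1, some p) := by
        simp [pvStep, hcond, max_def, Prod.ext_iff]; omega
      rw [hstep, ih (max b (r + 1)) (r + 1) p (le_max_right _ _)]
      rw [pvF, if_pos hsp]
      have hF := pvF_ge t p (r + 1)
      rw [max_assoc, max_eq_right hF]
    · have hcond : (some s == some p) = false := by simp [hsp]
      have hstep : pvStep (b, r, some p) s = (max b 1, 1, some s) := by
        simp [pvStep, hcond, max_def, Prod.ext_iff]; omega
      rw [hstep, ih (max b 1) 1 s (le_max_right _ _)]
      rw [pvF, if_neg hsp]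
      have hF := pvF_ge t s 1
      rw [max_assoc, max_eq_right hF]
      rcases le_total r (pvF s 1 t) with hle | hle
      · rw [max_eq_right hle]
      · rw [max_eq_left hle, max_eq_left (hle.trans h), max_eq_left h]

theorem maxB_eq_pvF (numb : Int) (x : Int) (t : List Int)
    (hss : PySem.List.sorted (pvSums numb) (fun y => y) = x :: t) :
    max_len_group_alt numb = pvF x 1 t := by
  unfold max_len_group_alt
  rw [PySem.List.foldl_append_singleton_eq_map]
  simp only [List.nil_append]
  rw [show (PySem.List.pyRange 1 (numb + 1)).map (fun i => pvDigitLoop 0 i) = pvSums numb from rfl, hss]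
  show (List.foldl pvStep (pvStep (0, 0, none) x) t).1 = _
  have h1 : pvStep (0, 0, none) x = (1, 1, some x) := by simp [pvStep]
  rw [h1, pvFold_eq t 1 1 x le_rfl]
  have := pvF_ge t x 1
  omega

theorem pvF_spec (l : List Int) : ∀ (p r : Int), 1 ≤ r → l.Pairwise (· ≤ ·) → (∀ x ∈ l, p ≤ x) →
    ((pvF p r l = r + l.count p) ∨ ∃ v ∈ l, p < v ∧ pvF p r l = (l.count v : Int))
    ∧ (r + (l.count p : Int) ≤ pvF p r l)
    ∧ (∀ v ∈ l, p < v → (l.count v : Int) ≤ pvF p r l) := by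
  induction l with
  | nil =>
    intro p r hr _ _
    refine ⟨Or.inl (by simp [pvF]), by simp [pvF], by simp⟩
  | cons x t ih =>
    intro p r hr hpw hall
    have hx : p ≤ x := hall x (by simp)
    have hpwt : t.Pairwise (· ≤ ·) := (List.pairwise_cons.mp hpw).2
    have hxt : ∀ y ∈ t, x ≤ y := (List.pairwise_cons.mp hpw).1
    by_cases hxp : x = p
    · subst hxp
      have H := ih x (r + 1) (by omega) hpwt hxt
      rw [pvF, if_pos rfl]
      have hc : (x :: t).count x = t.count x + 1 := by simp
      refine ⟨?_, ?_, ?_⟩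
      · rcases H.1 with h | ⟨v, hv, hlt, he⟩
        · left; rw [h, hc]; push_cast; ring
        · right
          exact ⟨v, List.mem_cons_of_mem _ hv, hlt, by
            rw [he]
            have : (x :: t).count v = t.count v := by
              simp [List.count_cons]; omega
            rw [this]⟩
      · have := H.2.1; rw [hc]; push_cast; push_cast at this; omega
      · intro v hv hlt
        have hvne : v ≠ x := by omega
        have hvt : v ∈ t := by
          rcases List.mem_cons.mp hv with h | h
          · exact absurd h hvne
          · exact h
        have := H.2.2 v hvt hlt
        have hcv : (x :: t).count v = t.count v := by simp [List.count_cons]; omega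
        rw [hcv]; exact this
    · have hpx : p < x := lt_of_le_of_ne hx (fun h => hxp h.symm)
      have H := ih x 1 le_rfl hpwt hxt
      rw [pvF, if_neg hxp]
      have hFge : (1 : Int) ≤ pvF x 1 t := pvF_ge t x 1
      have hcp : (x :: t).count p = 0 := by
        rw [List.count_eq_zero]
        intro hmem
        rcases List.mem_cons.mp hmem with h | h
        · omega
        · have := hxt p h; omega
      have hcx : (x :: t).count x = t.count x + 1 := by simp
      refine ⟨?_, ?_, ?_⟩
      · rcases le_total (pvF x 1 t) r with hle | hle
        · left; rw [max_eq_left hle, hcp]; push_cast; ring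
        · right
          rcases H.1 with h | ⟨v, hv, hlt, he⟩
          · refine ⟨x, by simp, hpx, ?_⟩
            rw [max_eq_right hle, h, hcx]; push_cast; ring
          · have hvne : v ≠ x := by omega
            refine ⟨v, List.mem_cons_of_mem _ hv, by omega, ?_⟩
            rw [max_eq_right hle, he]
            have : (x :: t).count v = t.count v := by simp [List.count_cons]; omega
            rw [this]
      · rw [hcp]; push_cast; simp
      · intro v hv hlt
        by_cases hvx : v = x
        · subst hvx
          have := H.2.1
          rw [hcx]
          calc ((t.count v : Int) + 1) ≤ pvF v 1 t := by omega
            _ ≤ max r (pvF v 1 t) := le_max_right _ _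
        · have hvt : v ∈ t := by
            rcases List.mem_cons.mp hv with h | h
            · exact absurd h hvx
            · exact h
          have hxv : x < v := lt_of_le_of_ne (hxt v hvt) (fun h => hvx h.symm)
          have := H.2.2 v hvt hxv
          have hcv : (x :: t).count v = t.count v := by simp [List.count_cons]; omega
          rw [hcv]
          exact le_trans this (le_max_right _ _)

theorem maxB_isMaxCount (numb : Int) (h : 1 ≤ numb) :
    pvIsMaxCount (pvSums numb) (max_len_group_alt numb) := by
  have hssne : PySem.List.sorted (pvSums numb) (fun y => y) ≠ [] := by
    rw [Ne, PySem.List.sorted_eq_nil_iff]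
    rw [pvSums, PySem.List.pyRange_one_cons (by omega : (1:Int) < numb + 1)]
    simp
  cases hss : PySem.List.sorted (pvSums numb) (fun y => y) with
  | nil => exact absurd hss hssne
  | cons x t =>
    have hB := maxB_eq_pvF numb x t hss
    have hpw : (x :: t).Pairwise (fun a b : Int => a ≤ b) := by
      have := PySem.List.sorted_pairwise (pvSums numb) (fun y => y)
      rwa [hss] at this
    have hpwt := (List.pairwise_cons.mp hpw).2
    have hxt := (List.pairwise_cons.mp hpw).1
    have H := pvF_spec t x 1 le_rfl hpwt hxt
    have hperm : (x :: t).Perm (pvSums numb) := by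
      have := PySem.List.sorted_perm (pvSums numb) (fun y => y) false
      rwa [hss] at this
    rw [hB]
    have hmc : pvIsMaxCount (x :: t) (pvF x 1 t) := by
      constructor
      · rcases H.1 with h1 | ⟨v, hv, hlt, he⟩
        · refine ⟨x, List.mem_cons_self, ?_⟩
          rw [h1]
          have : (x :: t).count x = t.count x + 1 := by simp
          rw [this]; push_cast; ring
        · refine ⟨v, List.mem_cons_of_mem _ hv, ?_⟩
          rw [he]
          have : (x :: t).count v = t.count v := by simp [List.count_cons]; omega
          rw [this]
      · intro v hv
        by_cases hvx : v = x
        · subst hvx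
          have := H.2.1
          have hc : (v :: t).count v = t.count v + 1 := by simp
          rw [hc]; push_cast; omega
        · have hvt : v ∈ t := by
            rcases List.mem_cons.mp hv with h1 | h1
            · exact absurd h1 hvx
            · exact h1
          have hxv : x < v := lt_of_le_of_ne (hxt v hvt) (fun h1 => hvx h1.symm)
          have := H.2.2 v hvt hxv
          have hc : (x :: t).count v = t.count v := by simp [List.count_cons]; omega
          rw [hc]; exact this
    constructor
    · obtain ⟨v, hv, he⟩ := hmc.1
      exact ⟨v, hperm.mem_iff.mp hv, by rw [he, hperm.count_eq]⟩
    · intro v hv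
      have := hmc.2 v (hperm.mem_iff.mpr hv)
      rwa [hperm.count_eq] at this

-- ===== VERDICT (by name: the statement is the Claim_ definition above) =====
theorem max_len_group_spec : Claim_equal_max_len_group := by
  intro numb _ hpre
  unfold Spec_max_len_group
  exact pvIsMaxCount_unique (maxA_isMaxCount numb hpre) (maxB_isMaxCount numb hpre)
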